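-- pv_equiv track=rewrite | github.com/DarkOnGithub/Advent-of-code | 2024/12/day12.py | explore_connected_region
-- ===== SOURCE A (Python) =====
-- from typing import Dict, List, Set, Tuple
--
-- def explore_connected_region(
--     start_position: Tuple[int, int],
--     grid_map: Dict[Tuple[int, int], str],
--     explored_positions: Set[Tuple[int, int]],
--     search_directions: List[Tuple[int, int]]
-- ) -> Tuple[List[Tuple[int, int]], Set[Tuple[int, int, int, int]]]:
--     region_value = grid_map[start_position]
--     region_positions = [start_position]
--     region_boundary = set()
--     visited_positions = set()
--
--     for current_row, current_col in region_positions: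
--         visited_positions.add((current_row, current_col))
--
--         for delta_row, delta_col in search_directions:
--             next_row = current_row + delta_row
--             next_col = current_col + delta_col
--
--             if (next_row, next_col) in grid_map and (next_row, next_col) not in visited_positions:
--                 if grid_map[(next_row, next_col)] == region_value:
--                     explored_positions.add((next_row, next_col))
--                     visited_positions.add((next_row, next_col))
--                     region_positions.append((next_row, next_col))
--                 else:
--                     region_boundary.add((next_row, next_col, delta_row, delta_col))
--
--     return region_positions, region_boundary
-- ===== SOURCE B (Python) =====
-- def explore_connected_region(start_position, grid_map, explored_positions, search_directions):
--     region_value = grid_map[start_position]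
--     region_positions = [start_position]
--     visited_positions = set()
--
--     # Phase 1: frontier-by-frontier (layered) BFS; no boundary bookkeeping here.
--     frontier = [start_position]
--     while frontier:
--         next_frontier = []
--         for row, col in frontier:
--             visited_positions.add((row, col))
--             for delta_row, delta_col in search_directions:
--                 neighbour = (row + delta_row, col + delta_col)
--                 if grid_map.get(neighbour) == region_value and neighbour not in visited_positions:
--                     explored_positions.add(neighbour)
--                     visited_positions.add(neighbour)
--                     region_positions.append(neighbour)
--                     next_frontier.append(neighbour)
--         frontier = next_frontier
--
--     # Phase 2: derive the boundary from the finished region in one comprehension.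
--     region_boundary = {
--         (row + delta_row, col + delta_col, delta_row, delta_col)
--         for row, col in region_positions
--         for delta_row, delta_col in search_directions
--         if (row + delta_row, col + delta_col) in grid_map
--         and grid_map[(row + delta_row, col + delta_col)] != region_value
--     }
--     return region_positions, region_boundary
-- ===== Notes on version B (the rewrite author's own statement) =====
-- stated objective: alternative
-- what changed: B replaces A's append-while-iterating worklist by a frontier-by-frontier (layered) BFS and derives the boundary in a separate pass over the finished region instead of accumulating it inside the search loop.
import Mathlib
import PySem

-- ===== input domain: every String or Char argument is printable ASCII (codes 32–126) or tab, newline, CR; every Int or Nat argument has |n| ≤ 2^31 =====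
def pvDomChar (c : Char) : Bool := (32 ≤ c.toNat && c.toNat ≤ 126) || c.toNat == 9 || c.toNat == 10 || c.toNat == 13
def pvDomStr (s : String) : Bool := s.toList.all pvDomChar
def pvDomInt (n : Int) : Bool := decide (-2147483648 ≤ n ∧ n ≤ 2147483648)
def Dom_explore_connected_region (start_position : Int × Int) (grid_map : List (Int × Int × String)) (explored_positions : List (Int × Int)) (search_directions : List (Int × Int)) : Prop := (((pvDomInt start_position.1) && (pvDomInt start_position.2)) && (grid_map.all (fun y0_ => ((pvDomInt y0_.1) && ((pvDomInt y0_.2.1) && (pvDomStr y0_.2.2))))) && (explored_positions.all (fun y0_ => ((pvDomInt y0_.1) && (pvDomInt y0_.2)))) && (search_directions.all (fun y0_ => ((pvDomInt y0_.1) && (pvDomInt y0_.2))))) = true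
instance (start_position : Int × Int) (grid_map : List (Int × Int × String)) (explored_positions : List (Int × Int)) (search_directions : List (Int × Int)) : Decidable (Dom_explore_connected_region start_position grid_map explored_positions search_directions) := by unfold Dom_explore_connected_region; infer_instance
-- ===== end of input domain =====

-- B runs a frontier-by-frontier (layered) BFS instead of A's append-while-iterating worklist and
-- derives the boundary in a separate pass over the finished region (alternative decomposition);
-- equivalence is about the RETURN value only — both Python versions add the same cells to the
-- mutable set argument `explored_positions`.

-- ===== PORT A =====
-- grid_map is a Python dict keyed by the (row, col) pair: lookup = first matching key.
def gLookup (g : List (Int × Int × String)) (p : Int × Int) : Option String :=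
  match g with
  | [] => none
  | (r, c, s) :: t => if r = p.1 ∧ c = p.2 then some s else gLookup t p

-- one direction step of A's inner loop: state = (queue, visited, region, boundary)
def stepA (g : List (Int × Int × String)) (val : String) (c : Int × Int)
    (s : List (Int × Int) × PySem.Set (Int × Int) × List (Int × Int) × PySem.Set (Int × Int × Int × Int))
    (d : Int × Int) :
    List (Int × Int) × PySem.Set (Int × Int) × List (Int × Int) × PySem.Set (Int × Int × Int × Int) :=
  let n : Int × Int := (c.1 + d.1, c.2 + d.2)
  match gLookup g n with
  | none => s
  | some w =>
    if PySem.Set.contains s.2.1 n then s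
    else if w == val then (s.1 ++ [n], PySem.Set.add s.2.1 n, s.2.2.1 ++ [n], s.2.2.2)
    else (s.1, s.2.1, s.2.2.1, PySem.Set.add s.2.2.2 (n.1, n.2, d.1, d.2))

-- A's outer loop: Python iterates over region_positions while appending to it; ported as a
-- worklist recursion where the queue is the not-yet-processed suffix of region_positions.
-- fuel is a totality guard only: the loop visits each distinct grid key at most once (plus the
-- start cell), so grid_map.length + 1 iterations always suffice (proved via `unvis` below).
def bfsA (g : List (Int × Int × String)) (val : String) (dirs : List (Int × Int)) :
    Nat → List (Int × Int) → PySem.Set (Int × Int) → List (Int × Int) →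
    PySem.Set (Int × Int × Int × Int) → List (Int × Int) × PySem.Set (Int × Int × Int × Int)
  | 0, _, _, r, b => (r, b)
  | _ + 1, [], _, r, b => (r, b)
  | fuel + 1, c :: q, v, r, b =>
    let s := dirs.foldl (stepA g val c) (q, PySem.Set.add v c, r, b)
    bfsA g val dirs fuel s.1 s.2.1 s.2.2.1 s.2.2.2

def explore_connected_region (start_position : Int × Int) (grid_map : List (Int × Int × String)) (explored_positions : List (Int × Int)) (search_directions : List (Int × Int)) : (List (Int × Int)) × (List (Int × Int × Int × Int)) :=
  -- region_value = grid_map[start_position]; Pre_ excludes the KeyError (gLookup = none)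
  let region_value := (gLookup grid_map start_position).getD ""
  bfsA grid_map region_value search_directions (grid_map.length + 1) [start_position]
    PySem.Set.empty [start_position] PySem.Set.empty

-- ===== PORT B =====
-- Source B's grid_map.get(neighbour): first matching key, via List.find?
def gGet (g : List (Int × Int × String)) (p : Int × Int) : Option String :=
  (g.find? (fun e => decide (e.1 = p.1) && decide (e.2.1 = p.2))).map (fun e => e.2.2)

-- Source B phase 1, innermost step: state = (next_frontier, visited, region)
def stepL (g : List (Int × Int × String)) (val : String) (c : Int × Int)
    (s : List (Int × Int) × PySem.Set (Int × Int) × List (Int × Int)) (d : Int × Int) :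
    List (Int × Int) × PySem.Set (Int × Int) × List (Int × Int) :=
  let n : Int × Int := (c.1 + d.1, c.2 + d.2)
  if gGet g n == some val && !PySem.Set.contains s.2.1 n then
    (s.1 ++ [n], PySem.Set.add s.2.1 n, s.2.2 ++ [n])
  else s

-- processing of one frontier cell: mark it visited, then scan the directions
def layerStep (g : List (Int × Int × String)) (val : String) (dirs : List (Int × Int))
    (s : List (Int × Int) × PySem.Set (Int × Int) × List (Int × Int)) (c : Int × Int) :
    List (Int × Int) × PySem.Set (Int × Int) × List (Int × Int) :=
  dirs.foldl (stepL g val c) (s.1, PySem.Set.add s.2.1 c, s.2.2)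

-- Source B's `while frontier:` loop, layer by layer; fuel is a totality guard only
-- (each nonempty layer marks at least one previously unvisited grid key, see `unvis` below)
def bfsL (g : List (Int × Int × String)) (val : String) (dirs : List (Int × Int)) :
    Nat → List (Int × Int) → PySem.Set (Int × Int) → List (Int × Int) → List (Int × Int)
  | 0, _, _, r => r
  | _ + 1, [], _, r => r
  | fuel + 1, c :: f, v, r =>
    let s := (c :: f).foldl (layerStep g val dirs) ([], v, r)
    bfsL g val dirs fuel s.1 s.2.1 s.2.2

-- Source B phase 2: the boundary comprehension — per region cell, fold over the directions
def bnd1 (g : List (Int × Int × String)) (val : String) (dirs : List (Int × Int))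
    (b : PySem.Set (Int × Int × Int × Int)) (c : Int × Int) : PySem.Set (Int × Int × Int × Int) :=
  dirs.foldl (fun b d =>
    let n : Int × Int := (c.1 + d.1, c.2 + d.2)
    match gGet g n with
    | none => b
    | some w => if w == val then b else PySem.Set.add b (n.1, n.2, d.1, d.2)) b

def explore_connected_region_alt (start_position : Int × Int) (grid_map : List (Int × Int × String)) (explored_positions : List (Int × Int)) (search_directions : List (Int × Int)) : (List (Int × Int)) × (List (Int × Int × Int × Int)) :=
  let region_value := (gGet grid_map start_position).getD ""
  let region := bfsL grid_map region_value search_directions (grid_map.length + 1)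
    [start_position] PySem.Set.empty [start_position]
  (region, region.foldl (bnd1 grid_map region_value search_directions) PySem.Set.empty)

-- ===== PRECONDITION & SPEC =====
-- Pre_ excludes exactly the inputs on which Python A raises KeyError: start_position not a key of grid_map.
def Pre_explore_connected_region (start_position : Int × Int) (grid_map : List (Int × Int × String)) (explored_positions : List (Int × Int)) (search_directions : List (Int × Int)) : Prop :=
  ∃ e ∈ grid_map, (e.1, e.2.1) = start_position
instance (start_position : Int × Int) (grid_map : List (Int × Int × String)) (explored_positions : List (Int × Int)) (search_directions : List (Int × Int)) : Decidable (Pre_explore_connected_region start_position grid_map explored_positions search_directions) := by unfold Pre_explore_connected_region; infer_instance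

def pvWitness_explore_connected_region : (Int × Int) × (List (Int × Int × String)) × (List (Int × Int)) × (List (Int × Int)) :=
  ((0, 0), [(0, 0, "A"), (0, 1, "B")], [], [(0, 1), (0, -1)])

def Spec_explore_connected_region (start_position : Int × Int) (grid_map : List (Int × Int × String)) (explored_positions : List (Int × Int)) (search_directions : List (Int × Int)) (out : (List (Int × Int)) × (List (Int × Int × Int × Int))) : Prop := out = explore_connected_region_alt start_position grid_map explored_positions search_directions
instance (start_position : Int × Int) (grid_map : List (Int × Int × String)) (explored_positions : List (Int × Int)) (search_directions : List (Int × Int)) (out : (List (Int × Int)) × (List (Int × Int × Int × Int))) : Decidable (Spec_explore_connected_region start_position grid_map explored_positions search_directions out) := by unfold Spec_explore_connected_region; infer_instance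

-- ===== CLAIM (what is proved, stated in full; the proofs are below) =====
def Claim_equal_explore_connected_region : Prop := ∀ (start_position : Int × Int) (grid_map : List (Int × Int × String)) (explored_positions : List (Int × Int)) (search_directions : List (Int × Int)), Dom_explore_connected_region start_position grid_map explored_positions search_directions → Pre_explore_connected_region start_position grid_map explored_positions search_directions → Spec_explore_connected_region start_position grid_map explored_positions search_directions (explore_connected_region start_position grid_map explored_positions search_directions)

-- ===== LEMMAS AND PROOFS =====

-- proof-side bridge: A's loop phrased cell-by-cell without the boundary (worklist form);
-- bfsA is related to (bfsB, boundary pass) and bfsB to B's layered bfsL.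
def stepB (g : List (Int × Int × String)) (val : String) (c : Int × Int)
    (s : List (Int × Int) × PySem.Set (Int × Int) × List (Int × Int)) (d : Int × Int) :
    List (Int × Int) × PySem.Set (Int × Int) × List (Int × Int) :=
  let n : Int × Int := (c.1 + d.1, c.2 + d.2)
  match gLookup g n with
  | none => s
  | some w =>
    if PySem.Set.contains s.2.1 n then s
    else if w == val then (s.1 ++ [n], PySem.Set.add s.2.1 n, s.2.2 ++ [n])
    else s

def bfsB (g : List (Int × Int × String)) (val : String) (dirs : List (Int × Int)) :
    Nat → List (Int × Int) → PySem.Set (Int × Int) → List (Int × Int) → List (Int × Int)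
  | 0, _, _, r => r
  | _ + 1, [], _, r => r
  | fuel + 1, c :: q, v, r =>
    let s := dirs.foldl (stepB g val c) (q, PySem.Set.add v c, r)
    bfsB g val dirs fuel s.1 s.2.1 s.2.2

-- measure helpers: |unvisited grid keys| bounds the number of loop iterations
def gKeys (g : List (Int × Int × String)) : PySem.Set (Int × Int) :=
  PySem.Set.ofList (g.map (fun e => (e.1, e.2.1)))

def unvis (g : List (Int × Int × String)) (v : PySem.Set (Int × Int)) : Nat :=
  (gKeys g).countP (fun k => !(PySem.Set.contains v k))

theorem gGet_eq_gLookup : ∀ (g : List (Int × Int × String)) (p : Int × Int),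
    gGet g p = gLookup g p
  | [], _ => rfl
  | (r, c, s) :: t, p => by
    unfold gGet gLookup
    by_cases hrc : r = p.1 ∧ c = p.2
    · simp [hrc.1, hrc.2]
    · have hb : ((fun (e : Int × Int × String) => decide (e.1 = p.1) && decide (e.2.1 = p.2)) (r, c, s)) = false := by
        rcases not_and_or.mp hrc with h | h <;> simp [h]
      rw [if_neg hrc, ← gGet_eq_gLookup t p]
      simp only [List.find?_cons, hb]
      rfl

theorem pv_countP_strict {α : Type} (p q : α → Bool) (n : α) :
    ∀ l : List α, n ∈ l → q n = true → p n = false → (∀ a, p a = true → q a = true) →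
      l.countP p < l.countP q
  | h :: t, hn, hq, hp, himp => by
    rcases List.mem_cons.mp hn with rfl | hnt
    · simp only [List.countP_cons, hp, hq, Bool.false_eq_true, if_false, if_true]
      have := List.countP_mono_left (l := t) (fun a _ ha => himp a ha)
      omega
    · have ih := pv_countP_strict p q n t hnt hq hp himp
      simp only [List.countP_cons]
      have hmono : (if p h = true then 1 else 0) ≤ (if q h = true then 1 else 0) := by
        by_cases hx : p h = true
        · simp [hx, himp h hx]
        · simp [hx]
      omega

theorem pv_contains_true_of_mem {v : PySem.Set (Int × Int)} {k : Int × Int} (h : k ∈ v) :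
    PySem.Set.contains v k = true := (PySem.Set.contains_iff v k).mpr h

theorem pv_not_mem_of_contains_false {v : PySem.Set (Int × Int)} {k : Int × Int}
    (h : PySem.Set.contains v k = false) : k ∉ v := by
  intro hm
  rw [pv_contains_true_of_mem hm] at h
  cases h

theorem unvis_add_le (g : List (Int × Int × String)) (v : PySem.Set (Int × Int)) (x : Int × Int) :
    unvis g (PySem.Set.add v x) ≤ unvis g v := by
  unfold unvis
  apply List.countP_mono_left
  intro k _ hk
  simp only [Bool.not_eq_true'] at hk ⊢
  cases hvk : PySem.Set.contains v k
  · rfl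
  · exfalso
    have hkv : k ∈ PySem.Set.add v x :=
      (PySem.Set.mem_add _ _ _).mpr (Or.inl ((PySem.Set.contains_iff v k).mp hvk))
    rw [pv_contains_true_of_mem hkv] at hk
    cases hk

theorem gKeys_of_lookup : ∀ (g : List (Int × Int × String)) (n : Int × Int) (w : String),
    gLookup g n = some w → n ∈ gKeys g
  | (r, c, s) :: t, n, w, h => by
    rw [gKeys, PySem.Set.mem_ofList]
    unfold gLookup at h
    by_cases hrc : r = n.1 ∧ c = n.2
    · refine List.mem_cons.mpr (Or.inl ?_)
      show n = (r, c)
      simp [hrc.1, hrc.2]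
    · rw [if_neg hrc] at h
      have := gKeys_of_lookup t n w h
      rw [gKeys, PySem.Set.mem_ofList] at this
      exact List.mem_cons.mpr (Or.inr this)

theorem unvis_add_lt (g : List (Int × Int × String)) (v : PySem.Set (Int × Int)) (n : Int × Int)
    (w : String) (hg : gLookup g n = some w) (hv : PySem.Set.contains v n = false) :
    unvis g (PySem.Set.add v n) < unvis g v := by
  unfold unvis
  apply pv_countP_strict _ _ n _ (gKeys_of_lookup g n w hg)
  · simp only [Bool.not_eq_true']
    exact hv
  · simp only [Bool.not_eq_false']
    exact pv_contains_true_of_mem ((PySem.Set.mem_add _ _ _).mpr (Or.inr rfl))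
  · intro a ha
    simp only [Bool.not_eq_true'] at ha ⊢
    cases hva : PySem.Set.contains v a
    · rfl
    · exfalso
      have hmem : a ∈ PySem.Set.add v n :=
        (PySem.Set.mem_add _ _ _).mpr (Or.inl ((PySem.Set.contains_iff v a).mp hva))
      rw [pv_contains_true_of_mem hmem] at ha
      cases ha

-- unfolding equations for stepA/stepB, by branch
theorem stepA_none (g : List (Int × Int × String)) (val : String) (c : Int × Int) (s) (d : Int × Int)
    (hg : gLookup g (c.1 + d.1, c.2 + d.2) = none) : stepA g val c s d = s := by
  simp [stepA, hg]

theorem stepA_skip (g : List (Int × Int × String)) (val : String) (c : Int × Int) (s) (d : Int × Int)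
    (w : String) (hg : gLookup g (c.1 + d.1, c.2 + d.2) = some w)
    (hv : (c.1 + d.1, c.2 + d.2) ∈ s.2.1) : stepA g val c s d = s := by
  simp [stepA, hg, hv]

theorem stepA_grow (g : List (Int × Int × String)) (val : String) (c : Int × Int) (s) (d : Int × Int)
    (hg : gLookup g (c.1 + d.1, c.2 + d.2) = some val)
    (hv : PySem.Set.contains s.2.1 (c.1 + d.1, c.2 + d.2) = false) :
    stepA g val c s d
      = (s.1 ++ [(c.1 + d.1, c.2 + d.2)], PySem.Set.add s.2.1 (c.1 + d.1, c.2 + d.2),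
         s.2.2.1 ++ [(c.1 + d.1, c.2 + d.2)], s.2.2.2) := by
  simp [stepA, hg, pv_not_mem_of_contains_false hv]

theorem stepA_bound (g : List (Int × Int × String)) (val : String) (c : Int × Int) (s) (d : Int × Int)
    (w : String) (hg : gLookup g (c.1 + d.1, c.2 + d.2) = some w)
    (hv : PySem.Set.contains s.2.1 (c.1 + d.1, c.2 + d.2) = false) (hw : w ≠ val) :
    stepA g val c s d
      = (s.1, s.2.1, s.2.2.1, PySem.Set.add s.2.2.2 (c.1 + d.1, c.2 + d.2, d.1, d.2)) := by
  simp [stepA, hg, pv_not_mem_of_contains_false hv, hw]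

theorem stepB_none (g : List (Int × Int × String)) (val : String) (c : Int × Int) (s) (d : Int × Int)
    (hg : gLookup g (c.1 + d.1, c.2 + d.2) = none) : stepB g val c s d = s := by
  simp [stepB, hg]

theorem stepB_skip (g : List (Int × Int × String)) (val : String) (c : Int × Int) (s) (d : Int × Int)
    (w : String) (hg : gLookup g (c.1 + d.1, c.2 + d.2) = some w)
    (hv : (c.1 + d.1, c.2 + d.2) ∈ s.2.1) : stepB g val c s d = s := by
  simp [stepB, hg, hv]

theorem stepB_grow (g : List (Int × Int × String)) (val : String) (c : Int × Int) (s) (d : Int × Int)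
    (hg : gLookup g (c.1 + d.1, c.2 + d.2) = some val)
    (hv : PySem.Set.contains s.2.1 (c.1 + d.1, c.2 + d.2) = false) :
    stepB g val c s d
      = (s.1 ++ [(c.1 + d.1, c.2 + d.2)], PySem.Set.add s.2.1 (c.1 + d.1, c.2 + d.2),
         s.2.2 ++ [(c.1 + d.1, c.2 + d.2)]) := by
  simp [stepB, hg, pv_not_mem_of_contains_false hv]

theorem stepB_bound (g : List (Int × Int × String)) (val : String) (c : Int × Int) (s) (d : Int × Int)
    (w : String) (hg : gLookup g (c.1 + d.1, c.2 + d.2) = some w)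
    (hv : PySem.Set.contains s.2.1 (c.1 + d.1, c.2 + d.2) = false) (hw : w ≠ val) :
    stepB g val c s d = s := by
  simp [stepB, hg, pv_not_mem_of_contains_false hv, hw]

-- B's inner step is extensionally A's same-value step
theorem stepL_eq_stepB (g : List (Int × Int × String)) (val : String) (c : Int × Int) :
    stepL g val c = stepB g val c := by
  funext s d
  simp only [stepL, stepB, gGet_eq_gLookup]
  cases hg : gLookup g (c.1 + d.1, c.2 + d.2) with
  | none => simp
  | some w =>
    cases hv : PySem.Set.contains s.2.1 (c.1 + d.1, c.2 + d.2) with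
    | true => by_cases hw : w = val <;> simp [hw]
    | false => by_cases hw : w = val <;> first | simp [hw, hv] | simp [hw]

theorem stepB_measure (g : List (Int × Int × String)) (val : String) (c : Int × Int)
    (s : List (Int × Int) × PySem.Set (Int × Int) × List (Int × Int)) (d : Int × Int) :
    unvis g (stepB g val c s d).2.1 + (stepB g val c s d).1.length
      ≤ unvis g s.2.1 + s.1.length := by
  cases hg : gLookup g (c.1 + d.1, c.2 + d.2) with
  | none => rw [stepB_none g val c s d hg]
  | some w =>
    cases hv : PySem.Set.contains s.2.1 (c.1 + d.1, c.2 + d.2) with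
    | true => rw [stepB_skip g val c s d w hg ((PySem.Set.contains_iff _ _).mp hv)]
    | false =>
      by_cases hw : w = val
      · have hgv : gLookup g (c.1 + d.1, c.2 + d.2) = some val := by rw [hg, hw]
        rw [stepB_grow g val c s d hgv hv]
        have := unvis_add_lt g s.2.1 (c.1 + d.1, c.2 + d.2) val hgv hv
        simp only [List.length_append, List.length_cons, List.length_nil]
        omega
      · rw [stepB_bound g val c s d w hg hv hw]

theorem foldB_measure (g : List (Int × Int × String)) (val : String) (c : Int × Int)
    (dirs : List (Int × Int))
    (s : List (Int × Int) × PySem.Set (Int × Int) × List (Int × Int)) :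
    unvis g (dirs.foldl (stepB g val c) s).2.1 + (dirs.foldl (stepB g val c) s).1.length
      ≤ unvis g s.2.1 + s.1.length := by
  induction dirs generalizing s with
  | nil => simp
  | cons d rest ih =>
    simp only [List.foldl_cons]
    exact le_trans (ih _) (stepB_measure g val c s d)

-- clean unfolding equations for the worklist recursions (all definitional)
theorem bfsA_zero (g : List (Int × Int × String)) (val : String) (dirs : List (Int × Int))
    (q : List (Int × Int)) (v : PySem.Set (Int × Int)) (r : List (Int × Int))
    (b : PySem.Set (Int × Int × Int × Int)) :
    bfsA g val dirs 0 q v r b = (r, b) := rfl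

theorem bfsA_nil (g : List (Int × Int × String)) (val : String) (dirs : List (Int × Int))
    (fuel : Nat) (v : PySem.Set (Int × Int)) (r : List (Int × Int))
    (b : PySem.Set (Int × Int × Int × Int)) :
    bfsA g val dirs (fuel + 1) [] v r b = (r, b) := rfl

theorem bfsA_cons (g : List (Int × Int × String)) (val : String) (dirs : List (Int × Int))
    (fuel : Nat) (c : Int × Int) (q : List (Int × Int)) (v : PySem.Set (Int × Int))
    (r : List (Int × Int)) (b : PySem.Set (Int × Int × Int × Int)) :
    bfsA g val dirs (fuel + 1) (c :: q) v r b
      = bfsA g val dirs fuel (dirs.foldl (stepA g val c) (q, PySem.Set.add v c, r, b)).1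
          (dirs.foldl (stepA g val c) (q, PySem.Set.add v c, r, b)).2.1
          (dirs.foldl (stepA g val c) (q, PySem.Set.add v c, r, b)).2.2.1
          (dirs.foldl (stepA g val c) (q, PySem.Set.add v c, r, b)).2.2.2 := rfl

theorem bfsB_zero (g : List (Int × Int × String)) (val : String) (dirs : List (Int × Int))
    (q : List (Int × Int)) (v : PySem.Set (Int × Int)) (r : List (Int × Int)) :
    bfsB g val dirs 0 q v r = r := rfl

theorem bfsB_nil (g : List (Int × Int × String)) (val : String) (dirs : List (Int × Int))
    (fuel : Nat) (v : PySem.Set (Int × Int)) (r : List (Int × Int)) :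
    bfsB g val dirs (fuel + 1) [] v r = r := rfl

theorem bfsB_cons (g : List (Int × Int × String)) (val : String) (dirs : List (Int × Int))
    (fuel : Nat) (c : Int × Int) (q : List (Int × Int)) (v : PySem.Set (Int × Int))
    (r : List (Int × Int)) :
    bfsB g val dirs (fuel + 1) (c :: q) v r
      = bfsB g val dirs fuel (dirs.foldl (stepB g val c) (q, PySem.Set.add v c, r)).1
          (dirs.foldl (stepB g val c) (q, PySem.Set.add v c, r)).2.1
          (dirs.foldl (stepB g val c) (q, PySem.Set.add v c, r)).2.2 := rfl

-- bnd1 as a cons-step recursion, phrased over gLookup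
theorem bnd1_cons (g : List (Int × Int × String)) (val : String) (d : Int × Int)
    (rest : List (Int × Int)) (b : PySem.Set (Int × Int × Int × Int)) (c : Int × Int) :
    bnd1 g val (d :: rest) b c
      = bnd1 g val rest
          (match gLookup g (c.1 + d.1, c.2 + d.2) with
           | none => b
           | some w => if w == val then b
                       else PySem.Set.add b (c.1 + d.1, c.2 + d.2, d.1, d.2)) c := by
  simp only [bnd1, List.foldl_cons, gGet_eq_gLookup]

-- A's direction fold equals the worklist direction fold plus B's phase-2 fold for the current
-- cell, provided everything visited so far carries the region value.
theorem foldAB (g : List (Int × Int × String)) (val : String) (c : Int × Int) :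
    ∀ (dirs : List (Int × Int)) (q : List (Int × Int)) (v : PySem.Set (Int × Int))
      (r : List (Int × Int)) (b : PySem.Set (Int × Int × Int × Int)),
      (∀ x ∈ v, gLookup g x = some val) →
      dirs.foldl (stepA g val c) (q, v, r, b)
        = ((dirs.foldl (stepB g val c) (q, v, r)).1,
           (dirs.foldl (stepB g val c) (q, v, r)).2.1,
           (dirs.foldl (stepB g val c) (q, v, r)).2.2,
           bnd1 g val dirs b c) := by
  intro dirs
  induction dirs with
  | nil => intro q v r b _; simp [bnd1]
  | cons d rest ih =>
    intro q v r b hInv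
    simp only [List.foldl_cons, bnd1_cons]
    cases hg : gLookup g (c.1 + d.1, c.2 + d.2) with
    | none =>
      rw [stepA_none g val c _ d hg, stepB_none g val c _ d hg]
      exact ih q v r b hInv
    | some w =>
      cases hv : PySem.Set.contains v (c.1 + d.1, c.2 + d.2) with
      | true =>
        have hmem : (c.1 + d.1, c.2 + d.2) ∈ v := (PySem.Set.contains_iff _ _).mp hv
        have hwv : w = val := Option.some.inj ((hInv _ hmem).symm.trans hg).symm
        rw [stepA_skip g val c (q, v, r, b) d w hg hmem,
            stepB_skip g val c (q, v, r) d w hg hmem]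
        have hbeq : (w == val) = true := by simp [hwv]
        simp only [hbeq, if_true]
        exact ih q v r b hInv
      | false =>
        by_cases hw : w = val
        · have hgv : gLookup g (c.1 + d.1, c.2 + d.2) = some val := by rw [hg, hw]
          have hbeq : (w == val) = true := by simp [hw]
          simp only [hbeq, if_true]
          rw [stepA_grow g val c (q, v, r, b) d hgv hv, stepB_grow g val c (q, v, r) d hgv hv]
          apply ih
          intro x hx
          rcases (PySem.Set.mem_add _ _ _).mp hx with hxv | rfl
          · exact hInv x hxv
          · exact hgv
        · rw [stepA_bound g val c (q, v, r, b) d w hg hv hw,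
              stepB_bound g val c (q, v, r) d w hg hv hw]
          have hbeq : (w == val) = false := by simp [hw]
          simp only [hbeq, Bool.false_eq_true, if_false]
          exact ih q v r (PySem.Set.add b (c.1 + d.1, c.2 + d.2, d.1, d.2)) hInv

-- phase-1 preservation: the visited set and the queue keep carrying the region value, and the
-- region stays "processed prefix ++ queue"
theorem foldB_props (g : List (Int × Int × String)) (val : String) (c : Int × Int) :
    ∀ (dirs : List (Int × Int)) (s : List (Int × Int) × PySem.Set (Int × Int) × List (Int × Int))
      (p' : List (Int × Int)),
      (∀ x ∈ s.2.1, gLookup g x = some val) →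
      (∀ x ∈ s.1, gLookup g x = some val) →
      s.2.2 = p' ++ s.1 →
      (∀ x ∈ (dirs.foldl (stepB g val c) s).2.1, gLookup g x = some val) ∧
      (∀ x ∈ (dirs.foldl (stepB g val c) s).1, gLookup g x = some val) ∧
      (dirs.foldl (stepB g val c) s).2.2 = p' ++ (dirs.foldl (stepB g val c) s).1 := by
  intro dirs
  induction dirs with
  | nil => intro s p' h1 h2 h3; exact ⟨h1, h2, h3⟩
  | cons d rest ih =>
    intro s p' h1 h2 h3
    simp only [List.foldl_cons]
    cases hg : gLookup g (c.1 + d.1, c.2 + d.2) with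
    | none =>
      rw [stepB_none g val c s d hg]
      exact ih s p' h1 h2 h3
    | some w =>
      cases hv : PySem.Set.contains s.2.1 (c.1 + d.1, c.2 + d.2) with
      | true =>
        rw [stepB_skip g val c s d w hg ((PySem.Set.contains_iff _ _).mp hv)]
        exact ih s p' h1 h2 h3
      | false =>
        by_cases hw : w = val
        · have hgv : gLookup g (c.1 + d.1, c.2 + d.2) = some val := by rw [hg, hw]
          rw [stepB_grow g val c s d hgv hv]
          apply ih
          · intro x hx
            rcases (PySem.Set.mem_add _ _ _).mp hx with hxv | rfl
            · exact h1 x hxv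
            · exact hgv
          · intro x hx
            rcases List.mem_append.mp hx with hxq | hxn
            · exact h2 x hxq
            · rw [List.mem_singleton.mp hxn]
              exact hgv
          · show s.2.2 ++ _ = p' ++ (s.1 ++ _)
            rw [h3, List.append_assoc]
        · rw [stepB_bound g val c s d w hg hv hw]
          exact ih s p' h1 h2 h3

theorem foldB_r_app (g : List (Int × Int × String)) (val : String) (c : Int × Int)
    (dirs : List (Int × Int)) :
    ∀ (s : List (Int × Int) × PySem.Set (Int × Int) × List (Int × Int)),
      ∃ u, (dirs.foldl (stepB g val c) s).2.2 = s.2.2 ++ u := by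
  induction dirs with
  | nil => exact fun s => ⟨[], (List.append_nil _).symm⟩
  | cons d rest ih =>
    intro s
    simp only [List.foldl_cons]
    cases hg : gLookup g (c.1 + d.1, c.2 + d.2) with
    | none => rw [stepB_none g val c s d hg]; exact ih s
    | some w =>
      cases hv : PySem.Set.contains s.2.1 (c.1 + d.1, c.2 + d.2) with
      | true =>
        rw [stepB_skip g val c s d w hg ((PySem.Set.contains_iff _ _).mp hv)]
        exact ih s
      | false =>
        by_cases hw : w = val
        · have hgv : gLookup g (c.1 + d.1, c.2 + d.2) = some val := by rw [hg, hw]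
          rw [stepB_grow g val c s d hgv hv]
          obtain ⟨u, hu⟩ := ih (s.1 ++ [(c.1 + d.1, c.2 + d.2)],
            PySem.Set.add s.2.1 (c.1 + d.1, c.2 + d.2), s.2.2 ++ [(c.1 + d.1, c.2 + d.2)])
          exact ⟨(c.1 + d.1, c.2 + d.2) :: u, by rw [hu]; simp⟩
        · rw [stepB_bound g val c s d w hg hv hw]
          exact ih s

-- bfsB only appends to the region accumulator
theorem bfsB_prefix (g : List (Int × Int × String)) (val : String) (dirs : List (Int × Int)) :
    ∀ (fuel : Nat) (q : List (Int × Int)) (v : PySem.Set (Int × Int)) (r : List (Int × Int)),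
      ∃ t, bfsB g val dirs fuel q v r = r ++ t := by
  intro fuel
  induction fuel with
  | zero => exact fun q v r => ⟨[], by rw [bfsB_zero, List.append_nil]⟩
  | succ fuel ih =>
    intro q v r
    cases q with
    | nil => exact ⟨[], by rw [bfsB_nil, List.append_nil]⟩
    | cons c q' =>
      rw [bfsB_cons]
      obtain ⟨u, hu⟩ := foldB_r_app g val c dirs (q', PySem.Set.add v c, r)
      obtain ⟨t, ht⟩ := ih _ _ _
      exact ⟨u ++ t, by rw [ht, hu, List.append_assoc]⟩

-- the main invariant lemma: A's worklist loop = the worklist flood fill paired with B's phase-2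
-- fold over the cells not yet processed
theorem bfs_main (g : List (Int × Int × String)) (val : String) (dirs : List (Int × Int)) :
    ∀ (N : Nat) (q : List (Int × Int)) (v : PySem.Set (Int × Int)) (r : List (Int × Int))
      (b : PySem.Set (Int × Int × Int × Int)) (p : List (Int × Int)),
      unvis g v + q.length ≤ N →
      r = p ++ q →
      (∀ x ∈ v, gLookup g x = some val) →
      (∀ x ∈ q, gLookup g x = some val) →
      bfsA g val dirs N q v r b
        = (bfsB g val dirs N q v r,
           ((bfsB g val dirs N q v r).drop p.length).foldl (bnd1 g val dirs) b) := by
  intro N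
  induction N with
  | zero =>
    intro q v r b p hN hr _ _
    cases q with
    | nil =>
      rw [bfsA_zero, bfsB_zero]
      subst hr
      simp
    | cons c q' => simp at hN
  | succ N ihN =>
    intro q v r b p hN hr hInv hq
    cases q with
    | nil =>
      rw [bfsA_nil, bfsB_nil]
      subst hr
      simp
    | cons c q' =>
      have hc : gLookup g c = some val := hq c List.mem_cons_self
      have hInv' : ∀ x ∈ PySem.Set.add v c, gLookup g x = some val := by
        intro x hx
        rcases (PySem.Set.mem_add _ _ _).mp hx with hxv | rfl
        · exact hInv x hxv
        · exact hc
      have hq' : ∀ x ∈ q', gLookup g x = some val := fun x hx => hq x (List.mem_cons_of_mem c hx)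
      have hr' : r = (p ++ [c]) ++ q' := by rw [hr, List.append_cons]
      obtain ⟨hInvB, hqB, hshape⟩ :=
        foldB_props g val c dirs (q', PySem.Set.add v c, r) (p ++ [c]) hInv' hq' hr'
      have hmeas : unvis g (dirs.foldl (stepB g val c) (q', PySem.Set.add v c, r)).2.1
          + (dirs.foldl (stepB g val c) (q', PySem.Set.add v c, r)).1.length ≤ N := by
        have h1 : unvis g (dirs.foldl (stepB g val c) (q', PySem.Set.add v c, r)).2.1
            + (dirs.foldl (stepB g val c) (q', PySem.Set.add v c, r)).1.length
            ≤ unvis g (PySem.Set.add v c) + q'.length :=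
          foldB_measure g val c dirs (q', PySem.Set.add v c, r)
        have h2 := unvis_add_le g v c
        simp only [List.length_cons] at hN
        omega
      rw [bfsA_cons, bfsB_cons]
      rw [foldAB g val c dirs q' (PySem.Set.add v c) r b hInv']
      have hmain := ihN (dirs.foldl (stepB g val c) (q', PySem.Set.add v c, r)).1
        (dirs.foldl (stepB g val c) (q', PySem.Set.add v c, r)).2.1
        (dirs.foldl (stepB g val c) (q', PySem.Set.add v c, r)).2.2
        (bnd1 g val dirs b c) (p ++ [c]) hmeas hshape hInvB hqB
      rw [hmain]
      obtain ⟨t, ht⟩ := bfsB_prefix g val dirs N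
        (dirs.foldl (stepB g val c) (q', PySem.Set.add v c, r)).1
        (dirs.foldl (stepB g val c) (q', PySem.Set.add v c, r)).2.1
        (dirs.foldl (stepB g val c) (q', PySem.Set.add v c, r)).2.2
      rw [ht, hshape, List.append_assoc]
      have h1 : ((p ++ [c]) ++ ((dirs.foldl (stepB g val c) (q', PySem.Set.add v c, r)).1 ++ t)).drop p.length
          = [c] ++ ((dirs.foldl (stepB g val c) (q', PySem.Set.add v c, r)).1 ++ t) := by
        rw [List.append_assoc]
        exact List.drop_left
      have h2 : ((p ++ [c]) ++ ((dirs.foldl (stepB g val c) (q', PySem.Set.add v c, r)).1 ++ t)).drop (p ++ [c]).length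
          = (dirs.foldl (stepB g val c) (q', PySem.Set.add v c, r)).1 ++ t := List.drop_left
      rw [h1, h2]
      simp only [List.singleton_append, List.foldl_cons]

-- === bridging B's layered BFS to the worklist flood fill ===

-- the worklist step ignores its queue except for appending: a queue prefix passes through
theorem foldB_prepend (g : List (Int × Int × String)) (val : String) (c : Int × Int) :
    ∀ (dirs : List (Int × Int)) (x q : List (Int × Int)) (v : PySem.Set (Int × Int))
      (r : List (Int × Int)),
      dirs.foldl (stepB g val c) (x ++ q, v, r)
        = (x ++ (dirs.foldl (stepB g val c) (q, v, r)).1,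
           (dirs.foldl (stepB g val c) (q, v, r)).2.1,
           (dirs.foldl (stepB g val c) (q, v, r)).2.2) := by
  intro dirs
  induction dirs with
  | nil => intro x q v r; simp
  | cons d rest ih =>
    intro x q v r
    simp only [List.foldl_cons]
    cases hg : gLookup g (c.1 + d.1, c.2 + d.2) with
    | none =>
      rw [stepB_none g val c (x ++ q, v, r) d hg, stepB_none g val c (q, v, r) d hg]
      exact ih x q v r
    | some w =>
      cases hv : PySem.Set.contains v (c.1 + d.1, c.2 + d.2) with
      | true =>
        have hmem : (c.1 + d.1, c.2 + d.2) ∈ v := (PySem.Set.contains_iff _ _).mp hv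
        rw [stepB_skip g val c (x ++ q, v, r) d w hg hmem,
            stepB_skip g val c (q, v, r) d w hg hmem]
        exact ih x q v r
      | false =>
        by_cases hw : w = val
        · have hgv : gLookup g (c.1 + d.1, c.2 + d.2) = some val := by rw [hg, hw]
          rw [stepB_grow g val c (x ++ q, v, r) d hgv hv,
              stepB_grow g val c (q, v, r) d hgv hv]
          dsimp only
          rw [List.append_assoc]
          exact ih x (q ++ [(c.1 + d.1, c.2 + d.2)])
            (PySem.Set.add v (c.1 + d.1, c.2 + d.2)) (r ++ [(c.1 + d.1, c.2 + d.2)])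
        · rw [stepB_bound g val c (x ++ q, v, r) d w hg hv hw,
              stepB_bound g val c (q, v, r) d w hg hv hw]
          exact ih x q v r

-- processing a whole layer in the worklist = one layerStep fold
theorem layer_unroll (g : List (Int × Int × String)) (val : String) (dirs : List (Int × Int)) :
    ∀ (f k : List (Int × Int)) (v : PySem.Set (Int × Int)) (r : List (Int × Int)) (fuel : Nat),
      bfsB g val dirs (fuel + f.length) (f ++ k) v r
        = bfsB g val dirs fuel (f.foldl (layerStep g val dirs) (k, v, r)).1
            (f.foldl (layerStep g val dirs) (k, v, r)).2.1
            (f.foldl (layerStep g val dirs) (k, v, r)).2.2 := by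
  intro f
  induction f with
  | nil => intro k v r fuel; simp
  | cons c f' ih =>
    intro k v r fuel
    have hL : fuel + (c :: f').length = (fuel + f'.length) + 1 := by
      simp only [List.length_cons]; omega
    rw [hL, List.cons_append, bfsB_cons]
    rw [foldB_prepend g val c dirs f' k (PySem.Set.add v c) r]
    have hcell : layerStep g val dirs (k, v, r) c
        = dirs.foldl (stepB g val c) (k, PySem.Set.add v c, r) := by
      simp [layerStep, stepL_eq_stepB]
    have := ih (dirs.foldl (stepB g val c) (k, PySem.Set.add v c, r)).1
      (dirs.foldl (stepB g val c) (k, PySem.Set.add v c, r)).2.1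
      (dirs.foldl (stepB g val c) (k, PySem.Set.add v c, r)).2.2 fuel
    simp only [List.foldl_cons, hcell]
    rw [this]

-- bfsB is fuel-irrelevant once the fuel covers the measure
theorem bfsB_fuel (g : List (Int × Int × String)) (val : String) (dirs : List (Int × Int)) :
    ∀ (fuel fuel' : Nat) (q : List (Int × Int)) (v : PySem.Set (Int × Int)) (r : List (Int × Int)),
      unvis g v + q.length ≤ fuel → unvis g v + q.length ≤ fuel' →
      bfsB g val dirs fuel q v r = bfsB g val dirs fuel' q v r := by
  intro fuel
  induction fuel with
  | zero =>
    intro fuel' q v r h _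
    cases q with
    | nil => cases fuel' <;> rfl
    | cons c q' => simp only [List.length_cons] at h; omega
  | succ N ih =>
    intro fuel' q v r h h'
    cases q with
    | nil => cases fuel' <;> rfl
    | cons c q' =>
      cases fuel' with
      | zero => simp at h'
      | succ M =>
        rw [bfsB_cons, bfsB_cons]
        apply ih
        all_goals {
          have h1 := foldB_measure g val c dirs (q', PySem.Set.add v c, r)
          have h2 := unvis_add_le g v c
          dsimp only at h1
          simp only [List.length_cons] at h h'
          omega
        }

-- folding a layer never increases the measure
theorem layerFold_measure (g : List (Int × Int × String)) (val : String) (dirs : List (Int × Int)) :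
    ∀ (f : List (Int × Int)) (s : List (Int × Int) × PySem.Set (Int × Int) × List (Int × Int)),
      unvis g (f.foldl (layerStep g val dirs) s).2.1 + (f.foldl (layerStep g val dirs) s).1.length
        ≤ unvis g s.2.1 + s.1.length := by
  intro f
  induction f with
  | nil => intro s; simp
  | cons c f' ih =>
    intro s
    simp only [List.foldl_cons]
    refine le_trans (ih _) ?_
    have hcell : layerStep g val dirs s c
        = dirs.foldl (stepB g val c) (s.1, PySem.Set.add s.2.1 c, s.2.2) := by
      simp [layerStep, stepL_eq_stepB]
    rw [hcell]
    have h1 := foldB_measure g val c dirs (s.1, PySem.Set.add s.2.1 c, s.2.2)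
    have h2 := unvis_add_le g s.2.1 c
    dsimp only at h1
    omega

-- B's layered BFS computes the worklist flood fill
theorem bfsL_eq_bfsB (g : List (Int × Int × String)) (val : String) (dirs : List (Int × Int)) :
    ∀ (N : Nat) (f : List (Int × Int)) (v : PySem.Set (Int × Int)) (r : List (Int × Int)),
      unvis g v + f.length ≤ N →
      bfsL g val dirs N f v r = bfsB g val dirs N f v r := by
  intro N
  induction N with
  | zero => intro f v r _; rfl
  | succ N ih =>
    intro f v r h
    cases f with
    | nil => rfl
    | cons c f' =>
      have hL : (c :: f').length ≤ N + 1 := by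
        simp only [List.length_cons] at h ⊢
        omega
      have key := layer_unroll g val dirs (c :: f') [] v r (N + 1 - (c :: f').length)
      rw [List.append_nil] at key
      rw [show N + 1 - (c :: f').length + (c :: f').length = N + 1 from by omega] at key
      have hstep : bfsL g val dirs (N + 1) (c :: f') v r
          = bfsL g val dirs N ((c :: f').foldl (layerStep g val dirs) ([], v, r)).1
              ((c :: f').foldl (layerStep g val dirs) ([], v, r)).2.1
              ((c :: f').foldl (layerStep g val dirs) ([], v, r)).2.2 := rfl
      have hm := layerFold_measure g val dirs (c :: f') ([], v, r)
      dsimp only at hm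
      simp only [List.length_nil] at hm
      have hmeas : unvis g ((c :: f').foldl (layerStep g val dirs) ([], v, r)).2.1
          + ((c :: f').foldl (layerStep g val dirs) ([], v, r)).1.length
          ≤ N + 1 - (c :: f').length := by
        simp only [List.length_cons] at h ⊢
        omega
      rw [hstep, key,
          bfsB_fuel g val dirs (N + 1 - (c :: f').length) N _ _ _ hmeas
            (by simp only [List.length_cons] at h hmeas ⊢; omega)]
      exact ih _ _ _ (by simp only [List.length_cons] at h hmeas ⊢; omega)

-- start_position being a key of grid_map gives a successful lookup
theorem pre_lookup : ∀ (g : List (Int × Int × String)) (p : Int × Int),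
    (∃ e ∈ g, (e.1, e.2.1) = p) → ∃ w, gLookup g p = some w
  | (r, c, s) :: t, p, ⟨e, he, hep⟩ => by
    unfold gLookup
    by_cases hrc : r = p.1 ∧ c = p.2
    · exact ⟨s, if_pos hrc⟩
    · rw [if_neg hrc]
      rcases List.mem_cons.mp he with rfl | het
      · exact absurd ⟨congrArg Prod.fst hep, congrArg Prod.snd hep⟩ hrc
      · exact pre_lookup t p ⟨e, het, hep⟩

-- ===== VERDICT (by name: the statement is the Claim_ definition above) =====
theorem explore_connected_region_spec : Claim_equal_explore_connected_region := by
  intro sp g ep dirs _ hPre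
  obtain ⟨w, hw⟩ := pre_lookup g sp hPre
  unfold Spec_explore_connected_region explore_connected_region explore_connected_region_alt
  simp only [gGet_eq_gLookup, hw, Option.getD_some]
  have hfuel : unvis g PySem.Set.empty + ([sp] : List (Int × Int)).length ≤ g.length + 1 := by
    have h1 : unvis g PySem.Set.empty ≤ (gKeys g).length := by
      unfold unvis
      exact List.countP_le_length
    have h2 : (gKeys g).length ≤ (g.map (fun e => (e.1, e.2.1))).length :=
      PySem.Set.length_ofList_le _
    simp only [List.length_map] at h2
    simp only [List.length_cons, List.length_nil]
    omega
  rw [bfsL_eq_bfsB g w dirs (g.length + 1) [sp] PySem.Set.empty [sp] hfuel]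
  rw [bfs_main g w dirs (g.length + 1) [sp] PySem.Set.empty [sp] PySem.Set.empty []
      hfuel rfl
      (by intro x hx; cases hx)
      (by intro x hx; rw [List.mem_singleton.mp hx]; exact hw)]
  simp
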